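-- pv_equiv track=rewrite | github.com/Lizz-dankova/LAB | lab1.py | LongSubtraction
-- ===== SOURCE A (Python) =====
-- def LongSubtraction(a, b):
--     borrow = 0
--     sub = []
--     max_len = max(len(a), len(b))
--     for i in range(max_len):
--         temp_A = a[i] if i < len(a) else 0
--         temp_B = b[i] if i < len(b) else 0
--         temp = temp_A - temp_B - borrow
--         if temp >= 0:
--             sub.append(temp)
--             borrow = 0
--         else:
--             sub.append(temp + (2 ** 32))
--             borrow = 1
--     if borrow:
--         return None
--     while len(sub) > 1 and sub[-1] == 0:
--         sub.pop()
--     return sub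
-- ===== SOURCE B (Python) =====
-- def LongSubtraction(a, b):
--     B32 = 1 << 32
--     va = 0
--     for limb in reversed(a):
--         va = va * B32 + limb
--     vb = 0
--     for limb in reversed(b):
--         vb = vb * B32 + limb
--     d = va - vb
--     if d < 0:
--         return None
--     if d == 0:
--         return [0]
--     out = []
--     while d > 0:
--         out.append(d % B32)
--         d //= B32
--     return out
-- ===== Notes on version B (the rewrite author's own statement) =====
-- stated objective: simpler
-- what changed: Replaces the per-limb borrow-propagation loop plus trailing-zero stripping with one whole-number subtraction: both limb lists are packed into a single Python int (Horner, base 2^32), subtracted once, and the difference is re-split into canonical little-endian limbs.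
-- intended difference: On the single input a=[] and b=[], A returns the empty list [], which is not a valid limb representation of zero; B returns [0], the canonical representation A itself produces for every other zero difference. — e.g. on LongSubtraction([], []): A returns some [], B returns some [0]
-- outside the precondition, e.g. on LongSubtraction([2147483648], [-2147483648]): A returns [4294967296], B returns [0, 1]
import Mathlib
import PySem

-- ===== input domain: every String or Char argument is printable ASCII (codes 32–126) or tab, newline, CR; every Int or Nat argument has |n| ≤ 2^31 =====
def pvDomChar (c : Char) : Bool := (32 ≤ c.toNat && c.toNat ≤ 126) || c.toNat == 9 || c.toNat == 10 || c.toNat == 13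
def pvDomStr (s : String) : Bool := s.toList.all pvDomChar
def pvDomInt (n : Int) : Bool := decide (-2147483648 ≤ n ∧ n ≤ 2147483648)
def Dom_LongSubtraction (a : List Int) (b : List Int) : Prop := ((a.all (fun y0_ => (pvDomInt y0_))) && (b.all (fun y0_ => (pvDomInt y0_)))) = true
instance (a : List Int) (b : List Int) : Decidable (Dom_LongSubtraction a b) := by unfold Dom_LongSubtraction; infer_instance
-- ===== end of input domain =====

-- B replaces A's per-limb borrow loop by packing both lists into one big integer,
-- subtracting once, and re-splitting the difference into canonical base-2^32 limbs (objective: simpler).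

-- ===== PORT A =====
-- loop body of `for i in range(max_len)`: state is (borrow, sub)
def stepA (a b : List Int) (s : Int × List Int) (i : Int) : Int × List Int :=
  let tempA := if i < (a.length : Int) then PySem.List.pyGetD a i 0 else 0
  let tempB := if i < (b.length : Int) then PySem.List.pyGetD b i 0 else 0
  let temp := tempA - tempB - s.1
  if 0 ≤ temp then (0, s.2 ++ [temp]) else (1, s.2 ++ [temp + 4294967296])

-- `while len(sub) > 1 and sub[-1] == 0: sub.pop()` (fuel = length bounds the pops)
def stripAux : Nat → List Int → List Int
  | 0, sub => sub
  | n + 1, sub => if 1 < sub.length ∧ sub.getLast? = some 0 then stripAux n sub.dropLast else sub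

def stripA (sub : List Int) : List Int := stripAux sub.length sub

def LongSubtraction (a : List Int) (b : List Int) : Option (List Int) :=
  let maxLen : Int := max (a.length : Int) (b.length : Int)
  let st := (PySem.List.pyRange 0 maxLen 1).foldl (stepA a b) (0, [])
  if st.1 ≠ 0 then none else some (stripA st.2)

-- ===== PORT B =====
-- Horner packing of the little-endian limbs: `for limb in reversed(xs): v = v*B32 + limb`
def valB (xs : List Int) : Int := xs.reverse.foldl (fun acc x => acc * 4294967296 + x) 0

-- `while d > 0: out.append(d % B32); d //= B32` (fuel = d.toNat bounds the halvings)
def splitAux : Nat → Int → List Int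
  | 0, _ => []
  | n + 1, d =>
    if 0 < d then PySem.Int.mod d 4294967296 :: splitAux n (PySem.Int.floordiv d 4294967296) else []

def splitB (d : Int) : List Int := splitAux d.toNat d

def LongSubtraction_alt (a : List Int) (b : List Int) : Option (List Int) :=
  let va := valB a
  let vb := valB b
  let d := va - vb
  if d < 0 then none
  else if d = 0 then some [0]
  else some (splitB d)

-- ===== PRECONDITION & SPEC =====
-- Pre_ keeps the inputs on which the borrow loop's per-limb results are genuine 32-bit words:
-- every aligned limb difference a[i]-b[i] (0-padded) lies strictly within ±2^32.  A still returns
-- on the excluded inputs (possible only when limbs of opposite sign reach ±2^31), but there its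
-- per-limb arithmetic can emit the out-of-range limb 2^32 or a negative limb, i.e. a value that is
-- not a base-2^32 representation and that a renormalising whole-number subtraction cannot match.
def Pre_LongSubtraction (a : List Int) (b : List Int) : Prop :=
  ∀ i < max a.length b.length,
    -4294967295 ≤ a.getD i 0 - b.getD i 0 ∧ a.getD i 0 - b.getD i 0 < 4294967296
instance (a : List Int) (b : List Int) : Decidable (Pre_LongSubtraction a b) := by
  unfold Pre_LongSubtraction; infer_instance

def pvWitness_LongSubtraction : List Int × List Int := ([5, 1], [3])

-- On a = [] and b = [] A returns [], which is not a valid limb representation of zero;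
-- B returns [0], the canonical zero A itself produces for every other zero difference.
def D_LongSubtraction (a : List Int) (b : List Int) : Prop := a = [] ∧ b = []
instance (a : List Int) (b : List Int) : Decidable (D_LongSubtraction a b) := by
  unfold D_LongSubtraction; infer_instance

def Spec_LongSubtraction (a : List Int) (b : List Int) (out : Option (List Int)) : Prop :=
  ¬ D_LongSubtraction a b → out = LongSubtraction_alt a b
instance (a : List Int) (b : List Int) (out : Option (List Int)) : Decidable (Spec_LongSubtraction a b out) := by
  unfold Spec_LongSubtraction; infer_instance

def pvDiffWitness_LongSubtraction : List Int × List Int := ([], [])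
def pvDiffWitnessOut_LongSubtraction : (Option (List Int)) × (Option (List Int)) := (some [], some [0])

-- ===== CLAIM (what is proved, stated in full; the proofs are below) =====
def Claim_unchanged_LongSubtraction : Prop := ∀ (a : List Int) (b : List Int), Dom_LongSubtraction a b → Pre_LongSubtraction a b → Spec_LongSubtraction a b (LongSubtraction a b)
def Claim_changed_LongSubtraction : Prop := Dom_LongSubtraction (pvDiffWitness_LongSubtraction.1) (pvDiffWitness_LongSubtraction.2) ∧ Pre_LongSubtraction (pvDiffWitness_LongSubtraction.1) (pvDiffWitness_LongSubtraction.2) ∧ D_LongSubtraction (pvDiffWitness_LongSubtraction.1) (pvDiffWitness_LongSubtraction.2) ∧ LongSubtraction (pvDiffWitness_LongSubtraction.1) (pvDiffWitness_LongSubtraction.2) = pvDiffWitnessOut_LongSubtraction.1 ∧ LongSubtraction_alt (pvDiffWitness_LongSubtraction.1) (pvDiffWitness_LongSubtraction.2) = pvDiffWitnessOut_LongSubtraction.2 ∧ pvDiffWitnessOut_LongSubtraction.1 ≠ pvDiffWitnessOut_LongSubtraction.2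
def Claim_exact_LongSubtraction : Prop := ∀ (a : List Int) (b : List Int), Dom_LongSubtraction a b → Pre_LongSubtraction a b → D_LongSubtraction a b → LongSubtraction a b ≠ LongSubtraction_alt a b

-- ===== LEMMAS AND PROOFS =====

-- little-endian value of a limb list (proof-side characterisation)
def V : List Int → Int
  | [] => 0
  | x :: xs => x + 4294967296 * V xs

-- proof-side reformulation of A's indexed loop as structural recursion on the two lists
def drec (a b : List Int) (br : Int) : List Int × Int :=
  if a = [] ∧ b = [] then ([], br)
  else if 0 ≤ a.headD 0 - b.headD 0 - br then
    ((a.headD 0 - b.headD 0 - br) :: (drec a.tail b.tail 0).1, (drec a.tail b.tail 0).2)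
  else
    ((a.headD 0 - b.headD 0 - br + 4294967296) :: (drec a.tail b.tail 1).1, (drec a.tail b.tail 1).2)
termination_by a.length + b.length
decreasing_by
  all_goals rcases a with _ | ⟨x, a⟩ <;> rcases b with _ | ⟨y, b⟩ <;> simp_all <;> omega

-- canonical limb list: non-empty, bounded limbs, no trailing zero except the single list [0]
def Good (s : List Int) : Prop :=
  s ≠ [] ∧ (∀ x ∈ s, 0 ≤ x ∧ x < 4294967296) ∧ (s.getLast? = some 0 → s = [0])

theorem valB_eq_V (xs : List Int) : valB xs = V xs := by
  unfold valB
  rw [List.foldl_reverse]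
  induction xs with
  | nil => rfl
  | cons x xs ih => simp [V, List.foldr_cons, ih]; ring

theorem V_head_tail (xs : List Int) : V xs = xs.headD 0 + 4294967296 * V xs.tail := by
  cases xs <;> simp [V]

theorem V_nonneg_bound (s : List Int) (hb : ∀ x ∈ s, 0 ≤ x ∧ x < 4294967296) :
    0 ≤ V s ∧ V s < 4294967296 ^ s.length := by
  induction s with
  | nil => simp [V]
  | cons x xs ih =>
    obtain ⟨hx0, hxB⟩ := hb x (by simp)
    obtain ⟨h0, h1⟩ := ih (fun y hy => hb y (by simp [hy]))
    constructor
    · have : 0 ≤ (4294967296 : Int) * V xs := by positivity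
      simp [V]; omega
    · simp only [V, List.length_cons, pow_succ]
      nlinarith

theorem V_append_singleton (t : List Int) (x : Int) :
    V (t ++ [x]) = V t + x * 4294967296 ^ t.length := by
  induction t with
  | nil => simp [V]
  | cons y t ih => simp [V, ih, pow_succ]; ring

theorem V_pos_of_last_ne (s : List Int) (hne : s ≠ [])
    (hb : ∀ x ∈ s, 0 ≤ x ∧ x < 4294967296) (hl : s.getLast? ≠ some 0) : 0 < V s := by
  induction s with
  | nil => exact absurd rfl hne
  | cons x xs ih =>
    rcases xs with _ | ⟨y, ys⟩
    · have hx := hb x (by simp)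
      simp only [List.getLast?_singleton, ne_eq, Option.some.injEq] at hl
      simp only [V]
      omega
    · have h2 : (y :: ys).getLast? ≠ some 0 := by
        simpa [List.getLast?_cons_cons] using hl
      have hpos := ih (by simp) (fun z hz => hb z (by simp at hz ⊢; tauto)) h2
      have hx := hb x (by simp)
      simp only [V] at hpos ⊢
      omega

theorem good_tail (z : Int) (zs : List Int) (hg : Good (z :: zs)) (hne : zs ≠ []) :
    Good zs ∧ 0 < V zs := by
  obtain ⟨-, hb, hl⟩ := hg
  rcases zs with _ | ⟨w, ws⟩
  · exact absurd rfl hne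
  have hlast : (z :: w :: ws).getLast? = (w :: ws).getLast? := List.getLast?_cons_cons
  have hnz : (w :: ws).getLast? ≠ some 0 := by
    intro h
    have := hl (by rw [hlast]; exact h)
    simp at this
  have hbw : ∀ x ∈ w :: ws, 0 ≤ x ∧ x < 4294967296 := fun x hx => hb x (by simp at hx ⊢; tauto)
  refine ⟨⟨by simp, hbw, fun h => absurd h hnz⟩, ?_⟩
  exact V_pos_of_last_ne _ (by simp) hbw hnz

theorem good_unique : ∀ (n : Nat) (s t : List Int), s.length ≤ n →
    Good s → Good t → V s = V t → s = t := by
  intro n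
  induction n with
  | zero =>
    intro s t hle hs _ _
    exact absurd (List.eq_nil_of_length_eq_zero (Nat.le_zero.mp hle)) hs.1
  | succ n ih =>
    rintro (_ | ⟨x, xs⟩) t hle hs ht hv
    · exact absurd rfl hs.1
    rcases t with _ | ⟨y, ys⟩
    · exact absurd rfl ht.1
    have hx := hs.2.1 x (by simp)
    have hy := ht.2.1 y (by simp)
    simp only [V] at hv
    have hxy : x = y ∧ V xs = V ys := by omega
    rcases hxy with ⟨rfl, hv'⟩
    by_cases hxs : xs = []
    · by_cases hys : ys = []
      · rw [hxs, hys]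
      · exfalso
        have := (good_tail x ys ht hys).2
        rw [hxs] at hv'
        simp only [V] at hv'
        omega
    · by_cases hys : ys = []
      · exfalso
        have := (good_tail x xs hs hxs).2
        rw [hys] at hv'
        simp only [V] at hv'
        omega
      · have hgs := (good_tail x xs hs hxs).1
        have hgt := (good_tail x ys ht hys).1
        have hlen : xs.length ≤ n := by simp at hle; omega
        rw [ih xs ys hlen hgs hgt hv']

theorem stripAux_spec : ∀ (n : Nat) (s : List Int), s.length ≤ n → s ≠ [] →
    (∀ x ∈ s, 0 ≤ x ∧ x < 4294967296) →
    Good (stripAux n s) ∧ V (stripAux n s) = V s := by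
  intro n
  induction n with
  | zero => intro s hle hne _; exact absurd (List.eq_nil_of_length_eq_zero (Nat.le_zero.mp hle)) hne
  | succ n ih =>
    intro s hle hne hb
    by_cases h : 1 < s.length ∧ s.getLast? = some 0
    · rw [stripAux, if_pos h]
      obtain ⟨hlen, hlast⟩ := h
      have hdl : s.dropLast.length = s.length - 1 := List.length_dropLast
      have hsne : s.dropLast ≠ [] := by
        intro hc; rw [hc] at hdl; simp at hdl; omega
      have hdecomp : s.dropLast ++ [(0 : Int)] = s := by
        have h1 : s.getLast hne = 0 := by
          have := List.getLast?_eq_some_getLast (l := s) hne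
          rw [this] at hlast; exact Option.some_injective _ hlast
        rw [← h1]; exact List.dropLast_append_getLast _
      have hVs : V s = V s.dropLast := by
        conv_lhs => rw [← hdecomp]
        rw [V_append_singleton]; ring
      have hbd : ∀ x ∈ s.dropLast, 0 ≤ x ∧ x < 4294967296 := by
        intro x hx
        exact hb x (List.dropLast_sublist s |>.mem hx)
      have hld : s.dropLast.length ≤ n := by omega
      obtain ⟨hg, hv⟩ := ih s.dropLast hld hsne hbd
      exact ⟨hg, by rw [hv, hVs]⟩
    · rw [stripAux, if_neg h]
      rw [not_and_or, not_lt] at h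
      refine ⟨⟨hne, hb, ?_⟩, rfl⟩
      intro hlast
      have h1 : s.length = 1 := by
        have h0 : 0 < s.length := List.length_pos_of_ne_nil hne
        rcases h with h | h
        · omega
        · exact absurd hlast h
      rcases s with _ | ⟨z, zs⟩
      · simp at hne
      · simp only [List.length_cons] at h1
        have hz : zs = [] := List.eq_nil_of_length_eq_zero (by omega)
        subst hz
        simp only [List.getLast?_singleton, Option.some.injEq] at hlast
        rw [hlast]

theorem strip_spec (s : List Int) (hne : s ≠ []) (hb : ∀ x ∈ s, 0 ≤ x ∧ x < 4294967296) :
    Good (stripA s) ∧ V (stripA s) = V s :=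
  stripAux_spec s.length s (le_refl _) hne hb

theorem splitAux_zero (n : Nat) : splitAux n 0 = [] := by
  cases n <;> simp [splitAux]

theorem splitAux_spec : ∀ (n : Nat) (d : Int), d.toNat ≤ n → 0 < d →
    Good (splitAux n d) ∧ V (splitAux n d) = d := by
  intro n
  induction n with
  | zero => intro d hle hd; omega
  | succ n ih =>
    intro d hle hd
    rw [splitAux, if_pos hd,
        PySem.Int.mod_eq_emod_of_pos (by norm_num),
        PySem.Int.floordiv_eq_ediv_of_pos (by norm_num)]
    have hr0 : 0 ≤ d % 4294967296 := Int.emod_nonneg d (by norm_num)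
    have hrB : d % 4294967296 < 4294967296 := Int.emod_lt_of_pos d (by norm_num)
    have hqe : 4294967296 * (d / 4294967296) + d % 4294967296 = d := Int.mul_ediv_add_emod d _
    have hq0 : 0 ≤ d / 4294967296 := Int.ediv_nonneg (le_of_lt hd) (by norm_num)
    by_cases hq : 0 < d / 4294967296
    · have hqn : (d / 4294967296).toNat ≤ n := by omega
      obtain ⟨⟨hne, hbq, hlq⟩, hvq⟩ := ih (d / 4294967296) hqn hq
      refine ⟨⟨by simp, ?_, ?_⟩, ?_⟩
      · intro x hx
        rcases List.mem_cons.mp hx with rfl | hx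
        · exact ⟨hr0, hrB⟩
        · exact hbq x hx
      · intro hlast
        exfalso
        rcases hsq : splitAux n (d / 4294967296) with _ | ⟨w, ws⟩
        · exact hne hsq
        rw [hsq, List.getLast?_cons_cons] at hlast
        have := hlq (by rw [hsq]; exact hlast)
        rw [this] at hvq
        simp [V] at hvq
        omega
      · simp only [V, hvq]; omega
    · have hq0' : d / 4294967296 = 0 := by omega
      rw [hq0', splitAux_zero]
      refine ⟨⟨by simp, ?_, ?_⟩, ?_⟩
      · intro x hx; simp at hx; omega
      · intro hlast
        simp only [List.getLast?_singleton, Option.some.injEq] at hlast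
        omega
      · simp [V]; omega

theorem split_spec (d : Int) (hd : 0 < d) : Good (splitB d) ∧ V (splitB d) = d :=
  splitAux_spec d.toNat d (le_refl _) hd

-- the borrow-loop invariant
theorem getD_tail (xs : List Int) (i : Nat) : xs.tail.getD i 0 = xs.getD (i + 1) 0 := by
  cases xs <;> simp

theorem headD_eq_getD (xs : List Int) : xs.headD 0 = xs.getD 0 0 := by
  cases xs <;> simp

theorem drec_inv : ∀ (n : Nat) (a b : List Int) (br : Int), a.length + b.length ≤ n →
    (br = 0 ∨ br = 1) →
    (∀ i < max a.length b.length,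
      -4294967295 ≤ a.getD i 0 - b.getD i 0 ∧ a.getD i 0 - b.getD i 0 < 4294967296) →
    ((drec a b br).2 = 0 ∨ (drec a b br).2 = 1) ∧
    (∀ x ∈ (drec a b br).1, 0 ≤ x ∧ x < 4294967296) ∧
    (drec a b br).1.length = max a.length b.length ∧
    V (drec a b br).1 = V a - V b - br + (drec a b br).2 * 4294967296 ^ (max a.length b.length) := by
  intro n
  induction n with
  | zero =>
    intro a b br hle hbr hd
    have ha0 : a = [] := by rcases a with _|_ <;> simp_all
    have hb0 : b = [] := by rcases b with _|_ <;> simp_all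
    subst ha0; subst hb0
    rw [drec]
    simp [V]
    omega
  | succ n ih =>
    intro a b br hle hbr hd
    by_cases hab : a = [] ∧ b = []
    · obtain ⟨rfl, rfl⟩ := hab
      rw [drec]; simp [V]; omega
    · rw [drec, if_neg hab]
      set t := a.headD 0 - b.headD 0 - br with ht
      have hta : a.tail.length = a.length - 1 := by cases a <;> simp
      have htb : b.tail.length = b.length - 1 := by cases b <;> simp
      have hne0 : a.length ≠ 0 ∨ b.length ≠ 0 := by
        rcases a with _|_
        · rcases b with _|_
          · exact absurd ⟨rfl, rfl⟩ hab
          · right; simp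
        · left; simp
      have hmax : max a.length b.length = max a.tail.length b.tail.length + 1 := by omega
      have h0 := hd 0 (by omega)
      rw [← headD_eq_getD a, ← headD_eq_getD b] at h0
      have hdt : ∀ i < max a.tail.length b.tail.length,
          -4294967295 ≤ a.tail.getD i 0 - b.tail.getD i 0 ∧
            a.tail.getD i 0 - b.tail.getD i 0 < 4294967296 := by
        intro i hi
        rw [getD_tail a i, getD_tail b i]
        exact hd (i + 1) (by omega)
      have hlen : a.tail.length + b.tail.length ≤ n := by omega
      have hVa : V a = a.headD 0 + 4294967296 * V a.tail := V_head_tail a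
      have hVb : V b = b.headD 0 + 4294967296 * V b.tail := V_head_tail b
      by_cases htpos : 0 ≤ t
      · obtain ⟨ibr, ibd, ilen, iV⟩ := ih a.tail b.tail 0 hlen (Or.inl rfl) hdt
        simp only [if_pos htpos]
        refine ⟨ibr, ?_, ?_, ?_⟩
        · intro x hx
          rcases List.mem_cons.mp hx with rfl | hx
          · omega
          · exact ibd x hx
        · simp [ilen, hmax]
        · simp only [V, iV, hmax, pow_succ]
          rw [hVa, hVb, ht]
          ring
      · obtain ⟨ibr, ibd, ilen, iV⟩ := ih a.tail b.tail 1 hlen (Or.inr rfl) hdt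
        simp only [if_neg htpos]
        refine ⟨ibr, ?_, ?_, ?_⟩
        · intro x hx
          rcases List.mem_cons.mp hx with rfl | hx
          · omega
          · exact ibd x hx
        · simp [ilen, hmax]
        · simp only [V, iV, hmax, pow_succ]
          rw [hVa, hVb, ht]
          ring

-- value read by A's loop body equals the head of the dropped suffix
theorem getD_head_drop (xs : List Int) (j : Nat) :
    (if (j : Int) < (xs.length : Int) then PySem.List.pyGetD xs (j : Int) 0 else 0) =
      (xs.drop j).headD 0 := by
  by_cases h : j < xs.length
  · rw [if_pos (by exact_mod_cast h)]
    rw [PySem.List.pyGetD_natCast]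
    simp [List.getD, List.head?_eq_getElem?, List.getElem?_drop]
  · rw [if_neg (by omega)]
    rw [List.drop_of_length_le (Nat.le_of_not_lt h)]
    rfl

-- A's foldl over range(j, max_len) computes drec on the dropped suffixes
theorem loop_drec (a b : List Int) : ∀ (k j : Nat), j + k = max a.length b.length →
    ∀ (br : Int) (acc : List Int),
    (PySem.List.pyRange (j : Int) (max (a.length : Int) (b.length : Int)) 1).foldl (stepA a b) (br, acc) =
      ((drec (a.drop j) (b.drop j) br).2, acc ++ (drec (a.drop j) (b.drop j) br).1) := by
  intro k
  induction k with
  | zero =>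
    intro j hj br acc
    have hja : a.length ≤ j := by omega
    have hjb : b.length ≤ j := by omega
    rw [List.drop_of_length_le hja, List.drop_of_length_le hjb]
    rw [PySem.List.pyRange_one_eq_nil (by omega)]
    rw [drec]
    simp
  | succ k ih =>
    intro j hj br acc
    have hjlt : (j : Int) < max (a.length : Int) (b.length : Int) := by omega
    rw [PySem.List.pyRange_one_cons hjlt, List.foldl_cons]
    have hne : ¬(a.drop j = [] ∧ b.drop j = []) := by
      rintro ⟨h1, h2⟩
      have := congrArg List.length h1
      have := congrArg List.length h2
      simp at *
      omega
    rw [drec, if_neg hne]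
    have hstep : stepA a b (br, acc) (j : Int) =
        (if 0 ≤ (a.drop j).headD 0 - (b.drop j).headD 0 - br then
           ((0 : Int), acc ++ [(a.drop j).headD 0 - (b.drop j).headD 0 - br])
         else ((1 : Int), acc ++ [(a.drop j).headD 0 - (b.drop j).headD 0 - br + 4294967296])) := by
      simp only [stepA]
      rw [getD_head_drop a j, getD_head_drop b j]
    rw [hstep]
    have htail : ∀ xs : List Int, (xs.drop j).tail = xs.drop (j + 1) := by
      intro xs; rw [← List.drop_drop]; simp [List.tail_drop]
    set t := (a.drop j).headD 0 - (b.drop j).headD 0 - br with ht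
    have hcast : ((j : Int) + 1) = ((j + 1 : Nat) : Int) := by push_cast; ring
    by_cases htpos : 0 ≤ t
    · rw [if_pos htpos]
      rw [hcast, ih (j + 1) (by omega) 0 (acc ++ [t])]
      rw [htail a, htail b]
      simp [htpos]
    · rw [if_neg htpos]
      rw [hcast, ih (j + 1) (by omega) 1 (acc ++ [t + 4294967296])]
      rw [htail a, htail b]
      simp [htpos]

-- ===== VERDICT (by name: the statement is the Claim_ definition above) =====
theorem LongSubtraction_spec : Claim_unchanged_LongSubtraction := by
  intro a b hdom hpre
  unfold Spec_LongSubtraction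
  intro hD
  unfold Pre_LongSubtraction at hpre
  have hDne : ¬(a = [] ∧ b = []) := hD
  -- unfold A via the loop characterisation
  simp only [LongSubtraction]
  have hloop := loop_drec a b (max a.length b.length) 0 (by omega) 0 []
  simp only [Nat.cast_zero, List.drop_zero, List.nil_append] at hloop
  rw [hloop]
  obtain ⟨hbr, hbd, hlen, hV⟩ :=
    drec_inv (a.length + b.length) a b 0 (le_refl _) (Or.inl rfl) hpre
  set r := drec a b 0 with hr
  have hLpos : 1 ≤ max a.length b.length := by
    rcases a with _|_ <;> rcases b with _|_ <;> simp_all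
  have hrne : r.1 ≠ [] := by
    intro hc
    rw [hc] at hlen
    simp at hlen
    omega
  have hVbound := V_nonneg_bound r.1 hbd
  rw [hlen] at hVbound
  -- unfold B
  simp only [LongSubtraction_alt]
  rw [valB_eq_V, valB_eq_V]
  set d := V a - V b with hd
  rcases hbr with hbr0 | hbr1
  · -- no final borrow: d = V r.1 ≥ 0
    rw [hbr0] at hV
    simp only [zero_mul, add_zero, sub_zero] at hV
    have hdnn : ¬ d < 0 := by omega
    rw [if_neg (by simp [hbr0]), if_neg hdnn]
    by_cases hdz : d = 0
    · rw [if_pos hdz]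
      -- all limbs of r.1 are… V r.1 = 0, strip gives [0]
      obtain ⟨hgood, hvs⟩ := strip_spec r.1 hrne hbd
      have : stripA r.1 = [0] := by
        have hV0 : V (stripA r.1) = 0 := by omega
        obtain ⟨hne', hbd', hlast'⟩ := hgood
        apply hlast'
        rcases hgl : (stripA r.1).getLast? with _ | z
        · rw [List.getLast?_eq_none_iff] at hgl
          exact absurd hgl hne'
        · by_cases hz : z = 0
          · rw [hz]
          · exfalso
            have := V_pos_of_last_ne (stripA r.1) hne' hbd' (by rw [hgl]; simp [hz])
            omega
      rw [this]
    · rw [if_neg hdz]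
      have hdpos : 0 < d := by omega
      obtain ⟨hgs, hvs⟩ := strip_spec r.1 hrne hbd
      obtain ⟨hgq, hvq⟩ := split_spec d hdpos
      have := good_unique (stripA r.1).length (stripA r.1) (splitB d) (le_refl _) hgs hgq
        (by rw [hvs, hvq]; omega)
      rw [this]
  · -- final borrow: d < 0, both return none
    rw [hbr1] at hV
    have hdneg : d < 0 := by
      have hp : (0 : Int) < 4294967296 ^ max a.length b.length := by positivity
      omega
    rw [if_pos (by simp [hbr1]), if_pos hdneg]

theorem LongSubtraction_changed : Claim_changed_LongSubtraction := by
  unfold Claim_changed_LongSubtraction; decide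

theorem LongSubtraction_tight : Claim_exact_LongSubtraction := by
  intro a b _ _ hD
  obtain ⟨rfl, rfl⟩ := hD
  decide
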